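-- pv_equiv track=rewrite | github.com/maskaljunas/Intelligent_Tutor_ComprehensionProblems_DAiSEE | utils_backend.py | get_frame_interval_len
-- ===== SOURCE A (Python) =====
-- def get_frame_interval_len(frame_diff):
--     inter_interval = []
--     frame_len = []
--     length = 0
--     for item in frame_diff:
--         if item == 1:
--             length += 1
--         else:
--             frame_len.append(length)
--             inter_interval.append(item)
--             # blink_len = 0
--     frame_len.append(length)
--     return frame_len, inter_interval
-- ===== SOURCE B (Python) =====
-- def get_frame_interval_len(frame_diff):
--     # Closed-form: at the k-th break (absolute index i), the cumulative count
--     # of 1s seen so far is simply i - k; the total count of 1s is len - #breaks.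
--     breaks = [(i, x) for i, x in enumerate(frame_diff) if x != 1]
--     frame_len = [i - k for k, (i, _) in enumerate(breaks)]
--     frame_len.append(len(frame_diff) - len(breaks))
--     inter_interval = [x for _, x in breaks]
--     return frame_len, inter_interval
-- ===== Notes on version B (the rewrite author's own statement) =====
-- stated objective: alternative
-- what changed: Replaces the stateful running-counter loop by a closed-form arithmetic: filter the breaks with their enumerate indices, compute each cumulative 1-count as index-minus-break-rank (i - k) and the final total as len - #breaks.
import Mathlib
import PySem

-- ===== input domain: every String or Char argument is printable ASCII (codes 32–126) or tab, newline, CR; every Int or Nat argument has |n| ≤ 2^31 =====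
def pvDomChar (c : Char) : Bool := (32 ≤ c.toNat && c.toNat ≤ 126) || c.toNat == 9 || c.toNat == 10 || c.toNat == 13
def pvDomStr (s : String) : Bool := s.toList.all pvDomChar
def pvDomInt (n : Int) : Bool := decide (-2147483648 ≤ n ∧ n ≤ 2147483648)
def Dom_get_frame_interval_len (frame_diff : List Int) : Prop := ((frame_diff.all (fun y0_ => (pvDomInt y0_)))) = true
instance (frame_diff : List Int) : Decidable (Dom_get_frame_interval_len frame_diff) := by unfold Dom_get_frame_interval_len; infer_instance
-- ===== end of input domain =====

-- B replaces A's running counter by closed-form index arithmetic (i - k at the k-th break); same O(n) cost.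

-- ===== PORT A =====
def get_frame_interval_len (frame_diff : List Int) : List Int × List Int :=
  let s := frame_diff.foldl (fun (st : List Int × List Int × Int) item =>
      if item == 1 then (st.1, st.2.1, st.2.2 + 1)
      else (st.1 ++ [st.2.2], st.2.1 ++ [item], st.2.2)) ([], [], 0)
  (s.1 ++ [s.2.2], s.2.1)

-- ===== PORT B =====
def get_frame_interval_len_alt (frame_diff : List Int) : List Int × List Int :=
  let breaks := (PySem.List.enumerate frame_diff 0).filter (fun p => p.2 != 1)
  let frame_len := ((PySem.List.enumerate breaks 0).map (fun q => q.2.1 - q.1))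
      ++ [(frame_diff.length : Int) - (breaks.length : Int)]
  let inter_interval := breaks.map (fun p => p.2)
  (frame_len, inter_interval)

-- ===== PRECONDITION & SPEC =====
def Spec_get_frame_interval_len (frame_diff : List Int) (out : List Int × List Int) : Prop := out = get_frame_interval_len_alt frame_diff
instance (frame_diff : List Int) (out : List Int × List Int) : Decidable (Spec_get_frame_interval_len frame_diff out) := by unfold Spec_get_frame_interval_len; infer_instance

-- ===== CLAIM (what is proved, stated in full; the proofs are below) =====
def Claim_equal_get_frame_interval_len : Prop := ∀ (frame_diff : List Int), Dom_get_frame_interval_len frame_diff → Spec_get_frame_interval_len frame_diff (get_frame_interval_len frame_diff)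

-- ===== LEMMAS AND PROOFS =====

-- reference recursion: (frame_len entries, inter_interval entries, final counter) from counter c
def pvGo : List Int → Int → List Int × List Int × Int
  | [], c => ([], [], c)
  | x :: xs, c =>
    if x = 1 then pvGo xs (c + 1)
    else
      let r := pvGo xs c
      (c :: r.1, x :: r.2.1, r.2.2)

theorem pvFoldA (fd : List Int) : ∀ (fl iv : List Int) (c : Int),
    fd.foldl (fun (st : List Int × List Int × Int) item =>
      if item == 1 then (st.1, st.2.1, st.2.2 + 1)
      else (st.1 ++ [st.2.2], st.2.1 ++ [item], st.2.2)) (fl, iv, c)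
    = (fl ++ (pvGo fd c).1, iv ++ (pvGo fd c).2.1, (pvGo fd c).2.2) := by
  induction fd with
  | nil => intro fl iv c; simp [pvGo]
  | cons x xs ih =>
    intro fl iv c
    rw [List.foldl_cons]
    by_cases h : x = 1
    · have hx : (if (x == 1) = true then (fl, iv, c + 1)
          else (fl ++ [c], iv ++ [x], c)) = ((fl, iv, c + 1) : List Int × List Int × Int) := by
        simp [h]
      rw [hx, ih]
      simp [pvGo, h]
    · have hx : (if (x == 1) = true then (fl, iv, c + 1)
          else (fl ++ [c], iv ++ [x], c)) = ((fl ++ [c], iv ++ [x], c) : List Int × List Int × Int) := by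
        simp [h]
      rw [hx, ih]
      simp [pvGo, h]

theorem pvFrameLen (fd : List Int) : ∀ (s t : Int),
    (PySem.List.enumerate ((PySem.List.enumerate fd s).filter (fun p => p.2 != 1)) t).map
        (fun q => q.2.1 - q.1)
    = (pvGo fd (s - t)).1 := by
  induction fd with
  | nil => intro s t; simp [PySem.List.enumerate_nil, pvGo]
  | cons x xs ih =>
    intro s t
    by_cases h : x = 1
    · have hst : s + 1 - t = s - t + 1 := by ring
      have := ih (s + 1) t
      rw [hst] at this
      simp [PySem.List.enumerate_cons, h, pvGo, this]
    · have hst : s + 1 - (t + 1) = s - t := by ring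
      have := ih (s + 1) (t + 1)
      rw [hst] at this
      simp [PySem.List.enumerate_cons, h, pvGo, this]

theorem pvInter (fd : List Int) : ∀ (s : Int) (c : Int),
    ((PySem.List.enumerate fd s).filter (fun p => p.2 != 1)).map (fun p => p.2)
    = (pvGo fd c).2.1 := by
  induction fd with
  | nil => intro s c; simp [PySem.List.enumerate_nil, pvGo]
  | cons x xs ih =>
    intro s c
    by_cases h : x = 1
    · simp [PySem.List.enumerate_cons, h, pvGo, ih (s + 1) (c + 1)]
    · simp [PySem.List.enumerate_cons, h, pvGo, ih (s + 1) c]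

theorem pvTotal (fd : List Int) : ∀ (c : Int),
    (pvGo fd c).2.2 = c + (fd.length : Int) - (((pvGo fd c).2.1).length : Int) := by
  induction fd with
  | nil => intro c; simp [pvGo]
  | cons x xs ih =>
    intro c
    by_cases h : x = 1
    · simp [pvGo, h, ih (c + 1)]; ring
    · simp [pvGo, h, ih c]; ring

-- ===== VERDICT (by name: the statement is the Claim_ definition above) =====
theorem get_frame_interval_len_spec : Claim_equal_get_frame_interval_len := by
  intro fd _
  unfold Spec_get_frame_interval_len get_frame_interval_len get_frame_interval_len_alt
  simp only [pvFoldA fd [] [] 0, List.nil_append]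
  have hfl := pvFrameLen fd 0 0
  have hiv := pvInter fd 0 0
  have hlen : (((PySem.List.enumerate fd 0).filter (fun p => p.2 != 1)).length : Int)
      = (((pvGo fd 0).2.1).length : Int) := by
    rw [← hiv]; simp
  have htot := pvTotal fd 0
  simp only [sub_zero] at hfl
  refine Prod.ext ?_ ?_
  · simp only [hfl, hlen, htot]; simp
  · simpa using hiv.symm
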